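-- pv_equiv track=rewrite | github.com/tanuki-create/datascience | leetcode/easy/009_single_number/solution.py | find_single_numbers_general
-- ===== SOURCE A (Python) =====
-- def find_single_numbers_general(nums, k):
--     """
--     General solution for k occurrences (bonus problem).
--
--     Args:
--         nums: List of integers
--         k: Number of times each number appears (except one)
--
--     Returns:
--         int: The single number
--     """
--     result = 0
--
--     # For each bit position
--     for i in range(32):
--         bit_count = 0
--
--         # Count how many numbers have this bit set
--         for num in nums:
--             if num & (1 << i):
--                 bit_count += 1
--
--         # If bit_count is not divisible by k, the single number has this bit set
--         if bit_count % k != 0: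
--             result |= (1 << i)
--
--     return result
-- ===== SOURCE B (Python) =====
-- def find_single_numbers_general(nums, k):
--     # Constant-space bitwise automaton (generalized "single number II"):
--     # instead of counting each bit position separately, keep, for all 32
--     # positions at once, a binary counter mod |k| spread across
--     # bit_length(|k|) 32-bit mask registers.  Each num ripple-increments
--     # the 32 counters in parallel; counters that reach |k| are reset.
--     # The answer is the OR of the registers: a bit is set exactly when its
--     # counter (= that bit's count mod |k|) is nonzero.
--     K = abs(k)
--     m = K.bit_length()
--     MASK32 = (1 << 32) - 1
--     regs = [0] * m
--     for num in nums:
--         carry = num & MASK32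
--         new_regs = []
--         for r in regs:
--             new_regs.append(r ^ carry)
--             carry = r & carry
--         regs = new_regs
--         done = MASK32
--         for j, r in enumerate(regs):
--             done &= r if (K >> j) & 1 else r ^ MASK32
--         regs = [r & (done ^ MASK32) for r in regs]
--     result = 0
--     for r in regs:
--         result |= r
--     return result
-- ===== Notes on version B (the rewrite author's own statement) =====
-- stated objective: alternative
-- what changed: Replaces A's 32 independent per-bit count-then-mod passes with the classic constant-space bitwise automaton: a binary counter mod |k| is kept for all 32 bit positions in parallel across bit_length(|k|) mask registers, each element ripple-increments them and counters reaching |k| are reset; the answer is the OR of the registers.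
import Mathlib
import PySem

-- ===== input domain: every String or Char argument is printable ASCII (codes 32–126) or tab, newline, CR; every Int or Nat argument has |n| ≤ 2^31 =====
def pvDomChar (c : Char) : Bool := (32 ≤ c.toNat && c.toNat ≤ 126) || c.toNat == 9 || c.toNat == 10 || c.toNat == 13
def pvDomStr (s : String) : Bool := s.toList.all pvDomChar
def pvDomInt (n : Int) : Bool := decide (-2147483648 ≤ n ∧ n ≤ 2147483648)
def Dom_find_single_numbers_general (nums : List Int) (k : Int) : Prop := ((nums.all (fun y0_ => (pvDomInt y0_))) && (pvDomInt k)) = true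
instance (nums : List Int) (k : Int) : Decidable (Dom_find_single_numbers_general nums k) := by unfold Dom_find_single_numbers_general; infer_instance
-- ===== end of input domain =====

-- B replaces A's 32 per-bit count-then-mod passes by the constant-space bitwise
-- automaton: binary counters mod |k| for all 32 bit positions kept in parallel
-- across bit_length(|k|) mask registers (alternative decomposition, same result).

-- ===== PORT A =====
-- for i in range(32): count nums with bit i set; if that count % k != 0, set bit i
def find_single_numbers_general (nums : List Int) (k : Int) : Int :=
  (List.range 32).foldl (fun result i =>
    let bit_count : Int := nums.foldl (fun bit_count num =>
      if PySem.Int.band num ((1 : Int) <<< (i : Nat)) ≠ 0 then bit_count + 1 else bit_count) 0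
    if PySem.Int.mod bit_count k ≠ 0 then PySem.Int.bor result ((1 : Int) <<< (i : Nat))
    else result) 0

-- ===== PORT B =====
-- MASK32 = (1 << 32) - 1
def pvMASK32 : Int := ((1 : Int) <<< (32 : Nat)) - 1

-- the inner `for r in regs: new_regs.append(r ^ carry); carry = r & carry` loop
def pvRipple : List Int → Int → List Int
  | [], _ => []
  | r :: rs, carry => PySem.Int.bxor r carry :: pvRipple rs (PySem.Int.band r carry)

-- the `for j, r in enumerate(regs): done &= r if (K >> j) & 1 else r ^ MASK32` loop
def pvDone (K : Nat) : List Int → Nat → Int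
  | [], _ => pvMASK32
  | r :: rs, j =>
      PySem.Int.band (if (K >>> j) &&& 1 ≠ 0 then r else PySem.Int.bxor r pvMASK32)
        (pvDone K rs (j + 1))

-- one iteration of the `for num in nums` loop body
def pvStep (K : Nat) (regs : List Int) (num : Int) : List Int :=
  let regs' := pvRipple regs (PySem.Int.band num pvMASK32)
  let done := pvDone K regs' 0
  regs'.map (fun r => PySem.Int.band r (PySem.Int.bxor done pvMASK32))

def find_single_numbers_general_alt (nums : List Int) (k : Int) : Int :=
  let K : Nat := k.natAbs
  let m : Nat := PySem.Int.bitLength k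
  let regs := nums.foldl (fun regs num => pvStep K regs num) (List.replicate m 0)
  regs.foldl (fun result r => PySem.Int.bor result r) 0

-- ===== PRECONDITION & SPEC =====
-- Pre_ excludes exactly k = 0, on which A raises ZeroDivisionError (bit_count % k).
def Pre_find_single_numbers_general (nums : List Int) (k : Int) : Prop := k ≠ 0
instance (nums : List Int) (k : Int) : Decidable (Pre_find_single_numbers_general nums k) := by unfold Pre_find_single_numbers_general; infer_instance
def pvWitness_find_single_numbers_general : List Int × Int := ([2, 2, 3], 2)

def Spec_find_single_numbers_general (nums : List Int) (k : Int) (out : Int) : Prop := out = find_single_numbers_general_alt nums k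
instance (nums : List Int) (k : Int) (out : Int) : Decidable (Spec_find_single_numbers_general nums k out) := by unfold Spec_find_single_numbers_general; infer_instance

-- ===== CLAIM (what is proved, stated in full; the proofs are below) =====
def Claim_equal_find_single_numbers_general : Prop := ∀ (nums : List Int) (k : Int), Dom_find_single_numbers_general nums k → Pre_find_single_numbers_general nums k → Spec_find_single_numbers_general nums k (find_single_numbers_general nums k)

-- ===== LEMMAS AND PROOFS =====

-- ---- generic bit facts ----

theorem pv_and_add_ldiff (m n : Nat) : (m &&& n) + Nat.ldiff m n = m := by
  induction m using Nat.binaryRec generalizing n with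
  | zero =>
    have h : Nat.ldiff 0 n = 0 := by
      apply Nat.eq_of_testBit_eq; simp [Nat.testBit_ldiff]
    simp [h]
  | bit b m ih =>
    have h2 : (n.testBit 0).toNat = n % 2 := by
      rw [Nat.testBit_zero]; rcases Nat.mod_two_eq_zero_or_one n with h | h <;> simp [h]
    have hn : n = Nat.bit (n.testBit 0) (n / 2) := by rw [Nat.bit_val]; omega
    rw [hn, Nat.land_bit, Nat.ldiff_bit, Nat.bit_val, Nat.bit_val, Nat.bit_val]
    have h3 := ih (n / 2)
    have h4 : (m &&& n / 2) ≤ m := Nat.and_le_left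
    cases b <;> cases hb : (n.testBit 0) <;> simp only [Bool.and_false, Bool.and_true,
      Bool.not_false, Bool.not_true, Bool.toNat_false, Bool.toNat_true] <;> omega

theorem pv_sub_and (m n : Nat) : m - (m &&& n) = Nat.ldiff m n := by
  have := pv_and_add_ldiff m n; omega

-- PySem's band agrees with Mathlib's Int.land when the right operand is nonnegative
theorem pv_band_land (a b : Int) (hb : 0 ≤ b) : PySem.Int.band a b = Int.land a b := by
  rcases a with m | m
  · rcases b with n | n
    · rfl
    · exact absurd hb (by simp)
  · rcases b with n | n
    · show PySem.Int.band (Int.negSucc m) (Int.ofNat n) = Int.ofNat (Nat.ldiff n m)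
      unfold PySem.Int.band
      have h1 : ¬ (0 ≤ Int.negSucc m) := by simp [Int.negSucc_not_nonneg]
      rw [if_neg h1, if_pos (by exact Int.natCast_nonneg n)]
      have h2 : (-(Int.negSucc m) - 1).toNat = m := by
        simp [Int.neg_negSucc]
      rw [h2]
      simp [Int.ofNat_eq_natCast]
      exact pv_sub_and n m
    · exact absurd hb (by simp)

theorem pv_mask_eq : pvMASK32 = ((2 ^ 32 - 1 : Nat) : Int) := by decide

theorem pv_testBit_nonneg (a : Int) (ha : 0 ≤ a) (i : Nat) :
    Int.testBit a i = a.toNat.testBit i := by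
  rcases a with m | m
  · rfl
  · exact absurd ha (by simp)

theorem pv_shift_one (i : Nat) : ((1 : Int) <<< i) = ((2 ^ i : Nat) : Int) := by
  rw [show ((1 : Int) <<< i) = ((1 <<< i : Nat) : Int) from rfl, Nat.shiftLeft_eq, one_mul]

-- A's truthiness test `num & (1 << i)` is exactly bit i of num
theorem pv_band_pow_ne_zero (num : Int) (i : Nat) :
    (PySem.Int.band num ((1 : Int) <<< i) ≠ 0) ↔ Int.testBit num i = true := by
  rw [pv_shift_one, pv_band_land num _ (Int.natCast_nonneg _)]
  rcases num with m | m
  · show (((m &&& 2 ^ i : Nat) : Int) ≠ 0) ↔ m.testBit i = true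
    rw [Nat.and_two_pow]
    cases h : m.testBit i <;> simp
  · show ((((2 ^ i : Nat).ldiff m : Nat) : Int) ≠ 0) ↔ (!m.testBit i) = true
    rw [← pv_sub_and (2 ^ i) m, Nat.two_pow_and]
    cases h : m.testBit i <;> simp

-- low 32 bits: nonneg, bounded, same bits below 32
theorem pv_low_nonneg (num : Int) : 0 ≤ PySem.Int.band num pvMASK32 := by
  rw [pv_mask_eq, pv_band_land num _ (Int.natCast_nonneg _)]
  rcases num with m | m
  · exact Int.natCast_nonneg _
  · exact Int.natCast_nonneg _

theorem pv_low_lt (num : Int) : PySem.Int.band num pvMASK32 < 2 ^ 32 := by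
  rw [pv_mask_eq, pv_band_land num _ (Int.natCast_nonneg _)]
  rcases num with m | m
  · show ((m &&& (2 ^ 32 - 1) : Nat) : Int) < 2 ^ 32
    have : (m &&& (2 ^ 32 - 1)) ≤ 2 ^ 32 - 1 := Nat.and_le_right
    omega
  · show (((2 ^ 32 - 1 : Nat).ldiff m : Nat) : Int) < 2 ^ 32
    have := pv_sub_and (2 ^ 32 - 1) m
    omega

theorem pv_low_bit (num : Int) (i : Nat) (hi : i < 32) :
    Int.testBit (PySem.Int.band num pvMASK32) i = Int.testBit num i := by
  rw [pv_mask_eq, pv_band_land num _ (Int.natCast_nonneg _)]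
  rcases num with m | m
  · show (m &&& (2 ^ 32 - 1) : Nat).testBit i = m.testBit i
    rw [Nat.testBit_and, Nat.testBit_two_pow_sub_one]
    simp [hi]
  · show ((2 ^ 32 - 1 : Nat).ldiff m).testBit i = !m.testBit i
    rw [Nat.testBit_ldiff, Nat.testBit_two_pow_sub_one]
    simp [hi]

-- ---- per-bit value of the register bank ----

def pvVal (i : Nat) : List Int → Nat
  | [] => 0
  | r :: rs => (Int.testBit r i).toNat + 2 * pvVal i rs

def pvWF (regs : List Int) : Prop := ∀ r ∈ regs, 0 ≤ r ∧ r < 2 ^ 32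

theorem pv_testBit_bxor (a b : Int) (ha : 0 ≤ a) (hb : 0 ≤ b) (i : Nat) :
    Int.testBit (PySem.Int.bxor a b) i = xor (Int.testBit a i) (Int.testBit b i) := by
  rw [PySem.Int.bxor_of_nonneg ha hb,
    show Int.testBit ((a.toNat ^^^ b.toNat : Nat) : Int) i = (a.toNat ^^^ b.toNat).testBit i from rfl,
    Nat.testBit_xor, pv_testBit_nonneg a ha, pv_testBit_nonneg b hb]

theorem pv_testBit_band (a b : Int) (ha : 0 ≤ a) (hb : 0 ≤ b) (i : Nat) :
    Int.testBit (PySem.Int.band a b) i = (Int.testBit a i && Int.testBit b i) := by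
  rw [PySem.Int.band_of_nonneg ha hb,
    show Int.testBit ((a.toNat &&& b.toNat : Nat) : Int) i = (a.toNat &&& b.toNat).testBit i from rfl,
    Nat.testBit_and, pv_testBit_nonneg a ha, pv_testBit_nonneg b hb]

theorem pv_testBit_bor (a b : Int) (ha : 0 ≤ a) (hb : 0 ≤ b) (i : Nat) :
    Int.testBit (PySem.Int.bor a b) i = (Int.testBit a i || Int.testBit b i) := by
  rw [PySem.Int.bor_of_nonneg ha hb,
    show Int.testBit ((a.toNat ||| b.toNat : Nat) : Int) i = (a.toNat ||| b.toNat).testBit i from rfl,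
    Nat.testBit_or, pv_testBit_nonneg a ha, pv_testBit_nonneg b hb]

theorem pv_ripple_len (regs : List Int) : ∀ c, (pvRipple regs c).length = regs.length := by
  induction regs with
  | nil => intro c; rfl
  | cons r rs ih => intro c; simp [pvRipple, ih]

theorem pv_ripple_wf (regs : List Int) : ∀ c, 0 ≤ c → c < 2 ^ 32 → pvWF regs →
    pvWF (pvRipple regs c) := by
  induction regs with
  | nil => intro c _ _ _; intro r hr; cases hr
  | cons r rs ih =>
    intro c hc0 hc32 hwf
    have hr := hwf r (by simp)
    intro x hx
    simp only [pvRipple] at hx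
    rw [List.mem_cons] at hx
    rcases hx with rfl | hx
    · constructor
      · rw [PySem.Int.bxor_of_nonneg hr.1 hc0]; exact Int.natCast_nonneg _
      · rw [PySem.Int.bxor_of_nonneg hr.1 hc0]
        have : r.toNat ^^^ c.toNat < 2 ^ 32 := Nat.xor_lt_two_pow (by omega) (by omega)
        omega
    · refine ih (PySem.Int.band r c) ?_ ?_ (fun y hy => hwf y (by simp [hy])) x hx
      · rw [PySem.Int.band_of_nonneg hr.1 hc0]; exact Int.natCast_nonneg _
      · rw [PySem.Int.band_of_nonneg hr.1 hc0]
        have : r.toNat &&& c.toNat ≤ r.toNat := Nat.and_le_left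
        omega

theorem pv_mod_double (a w n : Nat) (ha : a ≤ 1) :
    (a + 2 * w) % 2 ^ (n + 1) = a + 2 * (w % 2 ^ n) := by
  have hP : 0 < 2 ^ n := Nat.two_pow_pos n
  have hs : w % 2 ^ n < 2 ^ n := Nat.mod_lt _ hP
  have h1 : 2 * w % (2 * 2 ^ n) = 2 * (w % 2 ^ n) := Nat.mul_mod_mul_left 2 w (2 ^ n)
  rw [pow_succ, mul_comm (2 ^ (n : Nat)) 2]
  rw [Nat.add_mod, h1, Nat.mod_eq_of_lt (show a < 2 * 2 ^ n by omega),
    Nat.mod_eq_of_lt (show a + 2 * (w % 2 ^ n) < 2 * 2 ^ n by omega)]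

theorem pv_md0 (w n : Nat) : 2 * w % 2 ^ (n + 1) = 2 * (w % 2 ^ n) := by
  simpa using pv_mod_double 0 w n (by omega)

theorem pv_md1 (w n : Nat) : (1 + 2 * w) % 2 ^ (n + 1) = 1 + 2 * (w % 2 ^ n) := by
  simpa using pv_mod_double 1 w n (by omega)

theorem pv_adder (b c v n : Nat) (hb : b ≤ 1) (hc : c ≤ 1) :
    (b + c) % 2 + 2 * ((v + b * c) % 2 ^ n) = (b + 2 * v + c) % 2 ^ (n + 1) := by
  interval_cases b <;> interval_cases c
  · simpa using (pv_md0 v n).symm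
  · rw [show 0 + 2 * v + 1 = 1 + 2 * v by omega]
    simpa using (pv_md1 v n).symm
  · simpa using (pv_md1 v n).symm
  · rw [show 1 + 2 * v + 1 = 2 * (v + 1) by ring]
    simpa using (pv_md0 (v + 1) n).symm

theorem pv_ripple_val (i : Nat) (regs : List Int) : ∀ c, 0 ≤ c → pvWF regs →
    pvVal i (pvRipple regs c) = (pvVal i regs + (Int.testBit c i).toNat) % 2 ^ regs.length := by
  induction regs with
  | nil => intro c _ _; simp [pvRipple, pvVal, Nat.mod_one]
  | cons r rs ih =>
    intro c hc0 hwf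
    have hr := hwf r (by simp)
    have hb : Int.testBit (PySem.Int.bxor r c) i = xor (Int.testBit r i) (Int.testBit c i) :=
      pv_testBit_bxor r c hr.1 hc0 i
    have hcar : Int.testBit (PySem.Int.band r c) i = (Int.testBit r i && Int.testBit c i) :=
      pv_testBit_band r c hr.1 hc0 i
    have hcar0 : 0 ≤ PySem.Int.band r c := by
      rw [PySem.Int.band_of_nonneg hr.1 hc0]; exact Int.natCast_nonneg _
    show (Int.testBit (PySem.Int.bxor r c) i).toNat + 2 * pvVal i (pvRipple rs (PySem.Int.band r c))
        = ((Int.testBit r i).toNat + 2 * pvVal i rs + (Int.testBit c i).toNat) % 2 ^ (rs.length + 1)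
    rw [ih (PySem.Int.band r c) hcar0 (fun y hy => hwf y (by simp [hy])), hb, hcar]
    cases hbr : Int.testBit r i <;> cases hbc : Int.testBit c i
    · simpa using pv_adder 0 0 (pvVal i rs) rs.length (by omega) (by omega)
    · simpa using pv_adder 0 1 (pvVal i rs) rs.length (by omega) (by omega)
    · simpa using pv_adder 1 0 (pvVal i rs) rs.length (by omega) (by omega)
    · simpa using pv_adder 1 1 (pvVal i rs) rs.length (by omega) (by omega)

theorem pv_done_nonneg (K : Nat) (regs : List Int) : ∀ j, pvWF regs → 0 ≤ pvDone K regs j := by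
  induction regs with
  | nil => intro j _; simp only [pvDone]; rw [pv_mask_eq]; exact Int.natCast_nonneg _
  | cons r rs ih =>
    intro j hwf
    have hr := hwf r (by simp)
    have hrest := ih (j + 1) (fun y hy => hwf y (by simp [hy]))
    have hterm : 0 ≤ (if (K >>> j) &&& 1 ≠ 0 then r else PySem.Int.bxor r pvMASK32) := by
      split
      · exact hr.1
      · rw [PySem.Int.bxor_of_nonneg hr.1 (by rw [pv_mask_eq]; exact Int.natCast_nonneg _)]
        exact Int.natCast_nonneg _
    show 0 ≤ PySem.Int.band _ _
    rw [PySem.Int.band_of_nonneg hterm hrest]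
    exact Int.natCast_nonneg _

theorem pv_mask_bit (i : Nat) (hi : i < 32) : Int.testBit pvMASK32 i = true := by
  rw [pv_mask_eq]
  show (2 ^ 32 - 1 : Nat).testBit i = true
  rw [Nat.testBit_two_pow_sub_one]
  simp [hi]

theorem pv_done_bit (i : Nat) (hi : i < 32) (K : Nat) (regs : List Int) : ∀ j, pvWF regs →
    Int.testBit (pvDone K regs j) i = decide (pvVal i regs = (K >>> j) % 2 ^ regs.length) := by
  induction regs with
  | nil =>
    intro j _
    show Int.testBit pvMASK32 i = decide ((0 : Nat) = (K >>> j) % 2 ^ (0 : Nat))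
    rw [pv_mask_bit i hi]
    simp [Nat.mod_one]
  | cons r rs ih =>
    intro j hwf
    have hr := hwf r (by simp)
    have hwfrs : pvWF rs := fun y hy => hwf y (by simp [hy])
    have hrest0 := pv_done_nonneg K rs (j + 1) hwfrs
    have hmask0 : (0 : Int) ≤ pvMASK32 := by rw [pv_mask_eq]; exact Int.natCast_nonneg _
    have hterm0 : 0 ≤ (if (K >>> j) &&& 1 ≠ 0 then r else PySem.Int.bxor r pvMASK32) := by
      split
      · exact hr.1
      · rw [PySem.Int.bxor_of_nonneg hr.1 hmask0]; exact Int.natCast_nonneg _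
    show Int.testBit (PySem.Int.band _ (pvDone K rs (j + 1))) i = _
    rw [pv_testBit_band _ _ hterm0 hrest0, ih (j + 1) hwfrs]
    have hsplit : (K >>> j) % 2 ^ (rs.length + 1)
        = (K >>> j) % 2 + 2 * ((K >>> (j + 1)) % 2 ^ rs.length) := by
      rw [Nat.shiftRight_succ]
      conv_lhs => rw [← Nat.mod_add_div (K >>> j) 2]
      exact pv_mod_double _ _ _ (by omega)
    have hbit1 : ((K >>> j) &&& 1 ≠ 0) ↔ (K >>> j) % 2 = 1 := by
      rw [Nat.and_one_is_mod]; omega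
    show _ = decide ((Int.testBit r i).toNat + 2 * pvVal i rs = (K >>> j) % 2 ^ (rs.length + 1))
    rw [hsplit]
    rcases Nat.mod_two_eq_zero_or_one (K >>> j) with h2 | h2
    · rw [if_neg (by omega)]
      rw [pv_testBit_bxor r pvMASK32 hr.1 hmask0, pv_mask_bit i hi]
      cases hbr : Int.testBit r i <;>
        cases hd : decide (pvVal i rs = (K >>> (j + 1)) % 2 ^ rs.length) <;>
        simp_all <;> omega
    · rw [if_pos (by omega)]
      cases hbr : Int.testBit r i <;>
        cases hd : decide (pvVal i rs = (K >>> (j + 1)) % 2 ^ rs.length) <;>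
        simp_all <;> omega

theorem pv_mask_nonneg : (0 : Int) ≤ pvMASK32 := by
  rw [pv_mask_eq]; exact Int.natCast_nonneg _

theorem pv_reset_val (i : Nat) (hi : i < 32) (done : Int) (hd : 0 ≤ done) (regs : List Int)
    (hwf : pvWF regs) :
    pvVal i (regs.map (fun r => PySem.Int.band r (PySem.Int.bxor done pvMASK32)))
      = if Int.testBit done i then 0 else pvVal i regs := by
  induction regs with
  | nil => cases h : Int.testBit done i <;> (simp [pvVal])
  | cons r rs ih =>
    have hr := hwf r (by simp)
    have hwfrs : pvWF rs := fun y hy => hwf y (by simp [hy])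
    have hnd0 : 0 ≤ PySem.Int.bxor done pvMASK32 := by
      rw [PySem.Int.bxor_of_nonneg hd pv_mask_nonneg]; exact Int.natCast_nonneg _
    show (Int.testBit (PySem.Int.band r (PySem.Int.bxor done pvMASK32)) i).toNat
        + 2 * pvVal i (rs.map (fun r => PySem.Int.band r (PySem.Int.bxor done pvMASK32))) = _
    rw [pv_testBit_band r _ hr.1 hnd0, pv_testBit_bxor done pvMASK32 hd pv_mask_nonneg,
      pv_mask_bit i hi, ih hwfrs]
    cases h : Int.testBit done i <;> (simp [pvVal])

theorem pv_step_val (K : Nat) (hK : 1 ≤ K) (m : Nat) (hKm : K < 2 ^ m)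
    (regs : List Int) (num : Int) (hwf : pvWF regs) (hlen : regs.length = m)
    (i : Nat) (hi : i < 32) (hv : pvVal i regs < K) :
    pvVal i (pvStep K regs num) = (pvVal i regs + (Int.testBit num i).toNat) % K := by
  have hlow0 := pv_low_nonneg num
  have hlowlt := pv_low_lt num
  have hwf' := pv_ripple_wf regs _ hlow0 hlowlt hwf
  have hlen' : (pvRipple regs (PySem.Int.band num pvMASK32)).length = m := by
    rw [pv_ripple_len]; exact hlen
  have hb1 : (Int.testBit num i).toNat ≤ 1 := by cases Int.testBit num i <;> simp
  have hval' : pvVal i (pvRipple regs (PySem.Int.band num pvMASK32))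
      = pvVal i regs + (Int.testBit num i).toNat := by
    rw [pv_ripple_val i regs _ hlow0 hwf, pv_low_bit num i hi, hlen]
    exact Nat.mod_eq_of_lt (by omega)
  have hdone0 : 0 ≤ pvDone K (pvRipple regs (PySem.Int.band num pvMASK32)) 0 :=
    pv_done_nonneg K _ 0 hwf'
  have hdbit : Int.testBit (pvDone K (pvRipple regs (PySem.Int.band num pvMASK32)) 0) i
      = decide (pvVal i regs + (Int.testBit num i).toNat = K) := by
    rw [pv_done_bit i hi K _ 0 hwf', hval', hlen', Nat.shiftRight_zero, Nat.mod_eq_of_lt hKm]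
  show pvVal i ((pvRipple regs (PySem.Int.band num pvMASK32)).map _) = _
  rw [pv_reset_val i hi _ hdone0 _ hwf', hdbit, hval']
  by_cases hvk : pvVal i regs + (Int.testBit num i).toNat = K
  · rw [if_pos (by simp [hvk]), hvk, Nat.mod_self]
  · rw [if_neg (by simp [hvk]), Nat.mod_eq_of_lt (by omega)]

theorem pv_step_wf (K : Nat) (regs : List Int) (num : Int) (hwf : pvWF regs) :
    pvWF (pvStep K regs num) := by
  have hwf' := pv_ripple_wf regs _ (pv_low_nonneg num) (pv_low_lt num) hwf
  intro x hx
  simp only [pvStep, List.mem_map] at hx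
  obtain ⟨r, hr, rfl⟩ := hx
  have hrw := hwf' r hr
  have hnd0 : 0 ≤ PySem.Int.bxor (pvDone K (pvRipple regs (PySem.Int.band num pvMASK32)) 0) pvMASK32 := by
    rw [PySem.Int.bxor_of_nonneg (pv_done_nonneg K _ 0 hwf') pv_mask_nonneg]
    exact Int.natCast_nonneg _
  rw [PySem.Int.band_of_nonneg hrw.1 hnd0]
  constructor
  · exact Int.natCast_nonneg _
  · have h1 : r.toNat &&& (PySem.Int.bxor (pvDone K (pvRipple regs (PySem.Int.band num pvMASK32)) 0) pvMASK32).toNat ≤ r.toNat := Nat.and_le_left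
    omega

theorem pv_step_len (K : Nat) (regs : List Int) (num : Int) :
    (pvStep K regs num).length = regs.length := by
  simp [pvStep, pv_ripple_len]

theorem pv_val_ge32 (i : Nat) (hi : 32 ≤ i) (regs : List Int) (hwf : pvWF regs) :
    pvVal i regs = 0 := by
  induction regs with
  | nil => rfl
  | cons r rs ih =>
    have hr := hwf r (by simp)
    have hbit : Int.testBit r i = false := by
      rw [pv_testBit_nonneg r hr.1]
      exact Nat.testBit_lt_two_pow (by
        calc r.toNat < 2 ^ 32 := by omega
          _ ≤ 2 ^ i := Nat.pow_le_pow_right (by norm_num) hi)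
    show (Int.testBit r i).toNat + 2 * pvVal i rs = 0
    rw [hbit, ih (fun y hy => hwf y (by simp [hy]))]
    rfl

-- ---- the fold over nums ----

theorem pv_fold_val (K : Nat) (hK : 1 ≤ K) (m : Nat) (hKm : K < 2 ^ m)
    (nums : List Int) : ∀ (regs : List Int), pvWF regs → regs.length = m →
    ∀ (i : Nat), i < 32 → ∀ c : Nat, pvVal i regs = c % K →
    pvVal i (nums.foldl (fun regs num => pvStep K regs num) regs)
      = (c + nums.countP (fun num => Int.testBit num i)) % K := by
  induction nums with
  | nil => intro regs _ _ i _ c hc; simpa using hc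
  | cons num rest ih =>
    intro regs hwf hlen i hi c hc
    have hvlt : pvVal i regs < K := by rw [hc]; exact Nat.mod_lt _ (by omega)
    have hstep := pv_step_val K hK m hKm regs num hwf hlen i hi hvlt
    have hstep' : pvVal i (pvStep K regs num)
        = (c + (Int.testBit num i).toNat) % K := by
      rw [hstep, hc, Nat.mod_add_mod]
    have := ih (pvStep K regs num) (pv_step_wf K regs num hwf)
      (by rw [pv_step_len]; exact hlen) i hi (c + (Int.testBit num i).toNat) hstep'
    show pvVal i (rest.foldl (fun regs num => pvStep K regs num) (pvStep K regs num)) = _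
    rw [this, List.countP_cons]
    congr 1
    cases h : Int.testBit num i
    · simp
    · simp
      omega

theorem pv_fold_wf (K : Nat) (nums : List Int) : ∀ (regs : List Int), pvWF regs →
    pvWF (nums.foldl (fun regs num => pvStep K regs num) regs) := by
  induction nums with
  | nil => intro regs hwf; exact hwf
  | cons num rest ih => intro regs hwf; exact ih _ (pv_step_wf K regs num hwf)

theorem pv_fold_bor (i : Nat) (regs : List Int) : ∀ acc : Int, 0 ≤ acc → pvWF regs →
    Int.testBit (regs.foldl (fun result r => PySem.Int.bor result r) acc) i
      = (Int.testBit acc i || decide (pvVal i regs ≠ 0)) := by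
  induction regs with
  | nil => intro acc _ _; simp [pvVal]
  | cons r rs ih =>
    intro acc hacc hwf
    have hr := hwf r (by simp)
    have hacc' : 0 ≤ PySem.Int.bor acc r := by
      rw [PySem.Int.bor_of_nonneg hacc hr.1]; exact Int.natCast_nonneg _
    show Int.testBit (rs.foldl (fun result r => PySem.Int.bor result r) (PySem.Int.bor acc r)) i = _
    rw [ih (PySem.Int.bor acc r) hacc' (fun y hy => hwf y (by simp [hy])),
      pv_testBit_bor acc r hacc hr.1]
    show _ = (Int.testBit acc i || decide ((Int.testBit r i).toNat + 2 * pvVal i rs ≠ 0))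
    cases hb : Int.testBit r i <;> cases hd : decide (pvVal i rs ≠ 0) <;> simp_all

theorem pv_fold_bor_nonneg (regs : List Int) : ∀ acc : Int, 0 ≤ acc → pvWF regs →
    0 ≤ regs.foldl (fun result r => PySem.Int.bor result r) acc := by
  induction regs with
  | nil => intro acc hacc _; exact hacc
  | cons r rs ih =>
    intro acc hacc hwf
    have hr := hwf r (by simp)
    refine ih (PySem.Int.bor acc r) ?_ (fun y hy => hwf y (by simp [hy]))
    rw [PySem.Int.bor_of_nonneg hacc hr.1]
    exact Int.natCast_nonneg _

theorem pv_val_replicate (i m : Nat) : pvVal i (List.replicate m (0 : Int)) = 0 := by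
  induction m with
  | zero => rfl
  | succ m ih =>
    show (Int.testBit 0 i).toNat + 2 * pvVal i (List.replicate m (0 : Int)) = 0
    rw [ih, show Int.testBit 0 i = false from Nat.zero_testBit i]
    rfl

theorem pv_wf_replicate (m : Nat) : pvWF (List.replicate m (0 : Int)) := by
  intro r hr
  rw [List.eq_of_mem_replicate hr]
  norm_num

-- ---- characterisation of B ----

theorem pv_B_bits (nums : List Int) (k : Int) (hk : k ≠ 0) (i : Nat) :
    Int.testBit (find_single_numbers_general_alt nums k) i
      = (decide (i < 32) && decide ((nums.countP (fun num => Int.testBit num i)) % k.natAbs ≠ 0)) := by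
  have hK : 1 ≤ k.natAbs := Int.natAbs_pos.mpr hk
  have hKm : k.natAbs < 2 ^ PySem.Int.bitLength k := PySem.Int.lt_two_pow_bitLength k
  have hwf0 := pv_wf_replicate (PySem.Int.bitLength k)
  have hwfF := pv_fold_wf k.natAbs nums _ hwf0
  show Int.testBit ((nums.foldl (fun regs num => pvStep k.natAbs regs num)
      (List.replicate (PySem.Int.bitLength k) 0)).foldl
      (fun result r => PySem.Int.bor result r) 0) i = _
  rw [pv_fold_bor i _ 0 le_rfl hwfF, show Int.testBit 0 i = false from Nat.zero_testBit i,
    Bool.false_or]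
  by_cases hi : i < 32
  · rw [pv_fold_val k.natAbs hK _ hKm nums _ hwf0 (List.length_replicate) i hi 0
      (by rw [pv_val_replicate, Nat.zero_mod])]
    simp [hi]
  · rw [pv_val_ge32 i (by omega) _ hwfF]
    simp [hi]

theorem pv_B_nonneg (nums : List Int) (k : Int) : 0 ≤ find_single_numbers_general_alt nums k := by
  show 0 ≤ (nums.foldl (fun regs num => pvStep k.natAbs regs num)
      (List.replicate (PySem.Int.bitLength k) 0)).foldl (fun result r => PySem.Int.bor result r) 0
  exact pv_fold_bor_nonneg _ 0 le_rfl
    (pv_fold_wf k.natAbs nums _ (pv_wf_replicate (PySem.Int.bitLength k)))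

-- ---- characterisation of A ----

theorem pv_cnt (nums : List Int) (t : Nat) :
    nums.foldl (fun bit_count num =>
        if PySem.Int.band num ((1 : Int) <<< t) ≠ 0 then bit_count + 1 else bit_count) 0
      = ((nums.countP (fun num => Int.testBit num t) : Nat) : Int) := by
  have hfun : (fun (bit_count : Int) (num : Int) =>
      if PySem.Int.band num ((1 : Int) <<< t) ≠ 0 then bit_count + 1 else bit_count)
      = fun bit_count num => if (fun num => Int.testBit num t) num = true
          then bit_count + 1 else bit_count := by
    funext bit_count num
    by_cases h : Int.testBit num t = true
    · rw [if_pos ((pv_band_pow_ne_zero num t).mpr h), if_pos h]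
    · rw [if_neg (fun hc => h ((pv_band_pow_ne_zero num t).mp hc)), if_neg h]
  rw [hfun, PySem.List.foldl_count_if]
  simp

theorem pv_mod_cond (cnt : Nat) (k : Int) (hk : k ≠ 0) :
    (PySem.Int.mod ((cnt : Nat) : Int) k ≠ 0) ↔ (cnt % k.natAbs ≠ 0) := by
  apply not_congr
  rw [PySem.Int.mod_eq_zero_iff_dvd, ← Int.natAbs_dvd, Int.natCast_dvd_natCast,
    Nat.dvd_iff_mod_eq_zero]

theorem pv_A_loop (nums : List Int) (k : Int) (hk : k ≠ 0) (t : Nat) :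
    0 ≤ ((List.range t).foldl (fun result i =>
        let bit_count : Int := nums.foldl (fun bit_count num =>
          if PySem.Int.band num ((1 : Int) <<< (i : Nat)) ≠ 0 then bit_count + 1 else bit_count) 0
        if PySem.Int.mod bit_count k ≠ 0 then PySem.Int.bor result ((1 : Int) <<< (i : Nat))
        else result) 0)
    ∧ ∀ i : Nat, Int.testBit ((List.range t).foldl (fun result i =>
        let bit_count : Int := nums.foldl (fun bit_count num =>
          if PySem.Int.band num ((1 : Int) <<< (i : Nat)) ≠ 0 then bit_count + 1 else bit_count) 0
        if PySem.Int.mod bit_count k ≠ 0 then PySem.Int.bor result ((1 : Int) <<< (i : Nat))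
        else result) 0) i
      = (decide (i < t) && decide ((nums.countP (fun num => Int.testBit num i)) % k.natAbs ≠ 0)) := by
  induction t with
  | zero =>
    constructor
    · simp
    · intro i
      simp [show Int.testBit 0 i = false from Nat.zero_testBit i]
  | succ t ih =>
    rw [List.range_succ, List.foldl_append, List.foldl_cons, List.foldl_nil]
    obtain ⟨ih0, ihb⟩ := ih
    simp only
    rw [pv_cnt nums t]
    by_cases hc : PySem.Int.mod ((nums.countP (fun num => Int.testBit num t) : Nat) : Int) k ≠ 0
    · rw [if_pos hc]
      have hc' : (nums.countP (fun num => Int.testBit num t)) % k.natAbs ≠ 0 :=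
        (pv_mod_cond _ k hk).mp hc
      have hpow0 : (0 : Int) ≤ (1 : Int) <<< (t : Nat) := by
        rw [pv_shift_one]; exact Int.natCast_nonneg _
      constructor
      · rw [PySem.Int.bor_of_nonneg ih0 hpow0]; exact Int.natCast_nonneg _
      · intro i
        rw [pv_testBit_bor _ _ ih0 hpow0, ihb i, pv_shift_one,
          show Int.testBit ((2 ^ t : Nat) : Int) i = (2 ^ t : Nat).testBit i from rfl,
          Nat.testBit_two_pow]
        by_cases hit : i = t
        · subst hit
          simp [hc']
        · by_cases hlt : i < t
          · simp [hlt, show t ≠ i by omega, show i < t + 1 by omega]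
          · simp [hlt, show t ≠ i by omega, show ¬ (i < t + 1) by omega]
    · rw [if_neg hc]
      have hc' : ¬ ((nums.countP (fun num => Int.testBit num t)) % k.natAbs ≠ 0) :=
        fun h => hc ((pv_mod_cond _ k hk).mpr h)
      refine ⟨ih0, fun i => ?_⟩
      rw [ihb i]
      by_cases hit : i = t
      · subst hit
        simp [hc']
      · by_cases hlt : i < t
        · simp [hlt, show i < t + 1 by omega]
        · simp [hlt, show ¬ (i < t + 1) by omega]

theorem pv_A_bits (nums : List Int) (k : Int) (hk : k ≠ 0) (i : Nat) :
    Int.testBit (find_single_numbers_general nums k) i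
      = (decide (i < 32) && decide ((nums.countP (fun num => Int.testBit num i)) % k.natAbs ≠ 0)) :=
  (pv_A_loop nums k hk 32).2 i

theorem pv_A_nonneg (nums : List Int) (k : Int) (hk : k ≠ 0) :
    0 ≤ find_single_numbers_general nums k :=
  (pv_A_loop nums k hk 32).1

theorem pv_eq_of_bits (a b : Int) (ha : 0 ≤ a) (hb : 0 ≤ b)
    (h : ∀ i, Int.testBit a i = Int.testBit b i) : a = b := by
  rcases a with m | m
  · rcases b with n | n
    · exact congrArg Int.ofNat (Nat.eq_of_testBit_eq h)
    · exact absurd hb (by simp)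
  · exact absurd ha (by simp)

-- ===== VERDICT (by name: the statement is the Claim_ definition above) =====
theorem find_single_numbers_general_spec : Claim_equal_find_single_numbers_general := by
  intro nums k _ hk
  unfold Spec_find_single_numbers_general
  apply pv_eq_of_bits _ _ (pv_A_nonneg nums k hk) (pv_B_nonneg nums k)
  intro i
  rw [pv_A_bits nums k hk i, pv_B_bits nums k hk i]
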